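-- pv_equiv track=rewrite | github.com/maningtian/Ningtian-Ma | code/server.py | determine_investor_personality
-- ===== SOURCE A (Python) =====
-- def determine_investor_personality(responses):
--     # Initialize scores for each personality type
--     scores = {
--         'Preserver': 0,
--         'Follower': 0,
--         'Accumulator': 0,
--         'Individualist': 0
--     }
--
--     # Scoring matrix
--     scoring = {
--         'Preserver': {'A': 3, 'B': 0, 'C': 0, 'D': 1},
--         'Follower': {'A': 1, 'B': 3, 'C': 0, 'D': 1},
--         'Accumulator': {'A': 0, 'B': 1, 'C': 3, 'D': 2},
--         'Individualist': {'A': 0, 'B': 0, 'C': 1, 'D': 3}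
--     }
--
--     # Apply scoring
--     for i, answer in enumerate(responses):
--         for personality in scores:
--             scores[personality] += scoring[personality][answer]
--
--     # Determine the highest score
--     highest_score = max(scores.values())
--     # In case of a tie, you may decide how to handle it (e.g., pick the first one)
--     investor_personality = [ptype for ptype, score in scores.items() if score == highest_score][0]
--
--     return investor_personality
-- ===== SOURCE B (Python) =====
-- def determine_investor_personality(responses):
--     # Tally the four answers once, form the four scores as closed-form
--     # arithmetic, and decide the winner by an explicit comparison chain
--     # ("first personality that is >= all later ones" = first maximum in order):
--     # no scores dict, no max() pass, no filter pass.
--     counts = {'A': 0, 'B': 0, 'C': 0, 'D': 0}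
--     for r in responses:
--         counts[r] += 1
--     a, b, c, d = counts['A'], counts['B'], counts['C'], counts['D']
--     p = 3 * a + d
--     f = a + 3 * b + d
--     acc = b + 3 * c + 2 * d
--     ind = c + 3 * d
--     if p >= f and p >= acc and p >= ind:
--         return 'Preserver'
--     if f >= acc and f >= ind:
--         return 'Follower'
--     if acc >= ind:
--         return 'Accumulator'
--     return 'Individualist'
-- ===== Notes on version B (the rewrite author's own statement) =====
-- stated objective: alternative
-- what changed: Replaces A's per-response loop over the four personalities and its max-then-filter winner selection by a single answer tally, four closed-form arithmetic score expressions, and an explicit comparison chain that realises the first-maximum tie-break directly; the scores dict, max() pass and filter pass are gone.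
import Mathlib
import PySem

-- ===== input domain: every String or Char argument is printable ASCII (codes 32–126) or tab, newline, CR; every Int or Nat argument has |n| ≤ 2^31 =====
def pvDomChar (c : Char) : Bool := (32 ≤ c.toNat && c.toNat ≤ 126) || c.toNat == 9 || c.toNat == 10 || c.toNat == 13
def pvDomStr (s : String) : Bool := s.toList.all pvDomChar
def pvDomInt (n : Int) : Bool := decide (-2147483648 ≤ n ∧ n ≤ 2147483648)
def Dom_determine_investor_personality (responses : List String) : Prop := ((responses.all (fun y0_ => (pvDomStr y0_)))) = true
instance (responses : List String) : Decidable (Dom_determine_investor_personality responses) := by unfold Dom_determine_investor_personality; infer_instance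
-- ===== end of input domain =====

-- B drops A's dicts and max/filter passes: it counts the four answer letters, writes the four
-- scores as closed-form arithmetic and decides by a comparison chain (objective: alternative).


-- ===== PORT A =====
-- the scoring-matrix literal of A
def pvScoring : PySem.Dict String (PySem.Dict String Int) :=
  PySem.Dict.mk
    [("Preserver",     PySem.Dict.mk [("A", 3), ("B", 0), ("C", 0), ("D", 1)]),
     ("Follower",      PySem.Dict.mk [("A", 1), ("B", 3), ("C", 0), ("D", 1)]),
     ("Accumulator",   PySem.Dict.mk [("A", 0), ("B", 1), ("C", 3), ("D", 2)]),
     ("Individualist", PySem.Dict.mk [("A", 0), ("B", 0), ("C", 1), ("D", 3)])]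

def determine_investor_personality (responses : List String) : String :=
  let scores0 : PySem.Dict String Int :=
    PySem.Dict.mk [("Preserver", 0), ("Follower", 0), ("Accumulator", 0), ("Individualist", 0)]
  -- for i, answer in enumerate(responses): for personality in scores: scores[personality] += scoring[personality][answer]
  -- scoring[personality][answer] raises KeyError on an answer outside {A,B,C,D}; Pre_ excludes those, so getD 0 is exact here
  let scores := responses.foldl (fun sc answer =>
      sc.keys.foldl (fun sc p =>
        sc.modify p 0 (· + ((pvScoring.getD p (PySem.Dict.mk [])).getD answer 0))) sc) scores0
  -- highest_score = max(scores.values()); values has four elements, so max? is some and getD 0 is exact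
  let highest := (PySem.List.max? scores.values (fun v => v)).getD 0
  -- [ptype for ptype, score in scores.items() if score == highest][0]; nonempty since highest is itself a value
  (PySem.List.pyGet? ((scores.items.filter (fun pr => pr.2 == highest)).map (fun pr => pr.1)) 0).getD ""

-- ===== PORT B =====
def determine_investor_personality_alt (responses : List String) : String :=
  -- counts = {'A':0,'B':0,'C':0,'D':0}; for r in responses: counts[r] += 1
  -- counts[r] += 1 raises KeyError on an answer outside {A,B,C,D}; Pre_ excludes those, so modify is exact here
  let counts := responses.foldl (fun d r => d.modify r 0 (· + 1))
    (PySem.Dict.mk [("A", (0 : Int)), ("B", 0), ("C", 0), ("D", 0)])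
  let a : Int := counts.getD "A" 0
  let b : Int := counts.getD "B" 0
  let c : Int := counts.getD "C" 0
  let d : Int := counts.getD "D" 0
  let p := 3 * a + d
  let f := a + 3 * b + d
  let acc := b + 3 * c + 2 * d
  let ind := c + 3 * d
  if p ≥ f ∧ p ≥ acc ∧ p ≥ ind then "Preserver"
  else if f ≥ acc ∧ f ≥ ind then "Follower"
  else if acc ≥ ind then "Accumulator"
  else "Individualist"

-- ===== PRECONDITION & SPEC =====
-- Pre_ excludes exactly the inputs on which A raises KeyError: an answer outside {'A','B','C','D'}
def Pre_determine_investor_personality (responses : List String) : Prop :=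
  ∀ r ∈ responses, r = "A" ∨ r = "B" ∨ r = "C" ∨ r = "D"
instance (responses : List String) : Decidable (Pre_determine_investor_personality responses) := by unfold Pre_determine_investor_personality; infer_instance
def pvWitness_determine_investor_personality : List String := ["A", "C", "C", "B"]

def Spec_determine_investor_personality (responses : List String) (out : String) : Prop := out = determine_investor_personality_alt responses
instance (responses : List String) (out : String) : Decidable (Spec_determine_investor_personality responses out) := by unfold Spec_determine_investor_personality; infer_instance

-- ===== CLAIM (what is proved, stated in full; the proofs are below) =====
def Claim_equal_determine_investor_personality : Prop := ∀ (responses : List String), Dom_determine_investor_personality responses → Pre_determine_investor_personality responses → Spec_determine_investor_personality responses (determine_investor_personality responses)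

-- ===== LEMMAS AND PROOFS =====

-- one pass of A's inner 4-personality loop, for each of the four valid answers (pure computation)
lemma pvStepA (q g b j : Int) :
    (PySem.Dict.mk [("Preserver", q), ("Follower", g), ("Accumulator", b), ("Individualist", j)]).keys.foldl
      (fun sc p => sc.modify p 0 (· + ((pvScoring.getD p (PySem.Dict.mk [])).getD "A" 0)))
      (PySem.Dict.mk [("Preserver", q), ("Follower", g), ("Accumulator", b), ("Individualist", j)])
    = PySem.Dict.mk [("Preserver", q + 3), ("Follower", g + 1), ("Accumulator", b + 0), ("Individualist", j + 0)] := rfl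

lemma pvStepB (q g b j : Int) :
    (PySem.Dict.mk [("Preserver", q), ("Follower", g), ("Accumulator", b), ("Individualist", j)]).keys.foldl
      (fun sc p => sc.modify p 0 (· + ((pvScoring.getD p (PySem.Dict.mk [])).getD "B" 0)))
      (PySem.Dict.mk [("Preserver", q), ("Follower", g), ("Accumulator", b), ("Individualist", j)])
    = PySem.Dict.mk [("Preserver", q + 0), ("Follower", g + 3), ("Accumulator", b + 1), ("Individualist", j + 0)] := rfl

lemma pvStepC (q g b j : Int) :
    (PySem.Dict.mk [("Preserver", q), ("Follower", g), ("Accumulator", b), ("Individualist", j)]).keys.foldl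
      (fun sc p => sc.modify p 0 (· + ((pvScoring.getD p (PySem.Dict.mk [])).getD "C" 0)))
      (PySem.Dict.mk [("Preserver", q), ("Follower", g), ("Accumulator", b), ("Individualist", j)])
    = PySem.Dict.mk [("Preserver", q + 0), ("Follower", g + 0), ("Accumulator", b + 3), ("Individualist", j + 1)] := rfl

lemma pvStepD (q g b j : Int) :
    (PySem.Dict.mk [("Preserver", q), ("Follower", g), ("Accumulator", b), ("Individualist", j)]).keys.foldl
      (fun sc p => sc.modify p 0 (· + ((pvScoring.getD p (PySem.Dict.mk [])).getD "D" 0)))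
      (PySem.Dict.mk [("Preserver", q), ("Follower", g), ("Accumulator", b), ("Individualist", j)])
    = PySem.Dict.mk [("Preserver", q + 1), ("Follower", g + 1), ("Accumulator", b + 2), ("Individualist", j + 3)] := rfl

-- A's scoring fold adds the four weighted answer counts to the four running totals
lemma pvFoldA (rs : List String) (q g b j : Int)
    (h : ∀ r ∈ rs, r = "A" ∨ r = "B" ∨ r = "C" ∨ r = "D") :
    rs.foldl (fun sc answer =>
      sc.keys.foldl (fun sc p =>
        sc.modify p 0 (· + ((pvScoring.getD p (PySem.Dict.mk [])).getD answer 0))) sc)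
      (PySem.Dict.mk [("Preserver", q), ("Follower", g), ("Accumulator", b), ("Individualist", j)])
    = PySem.Dict.mk
        [("Preserver", q + 3 * (rs.count "A" : Int) + (rs.count "D" : Int)),
         ("Follower", g + (rs.count "A" : Int) + 3 * (rs.count "B" : Int) + (rs.count "D" : Int)),
         ("Accumulator", b + (rs.count "B" : Int) + 3 * (rs.count "C" : Int) + 2 * (rs.count "D" : Int)),
         ("Individualist", j + (rs.count "C" : Int) + 3 * (rs.count "D" : Int))] := by
  induction rs generalizing q g b j with
  | nil => simp
  | cons r rs ih =>
    have ht : ∀ x ∈ rs, x = "A" ∨ x = "B" ∨ x = "C" ∨ x = "D" :=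
      fun x hx => h x (List.mem_cons_of_mem _ hx)
    rcases h r (List.mem_cons_self ..) with hr | hr | hr | hr <;> subst hr <;>
      simp only [List.foldl_cons]
    · rw [pvStepA, ih _ _ _ _ ht]
      simp only [List.count_cons, String.reduceBEq, beq_self_eq_true, ite_true, PySem.Dict.mk.injEq, List.cons.injEq, Prod.mk.injEq]
      all_goals and_intros
      all_goals (push_cast; try ring)
    · rw [pvStepB, ih _ _ _ _ ht]
      simp only [List.count_cons, String.reduceBEq, beq_self_eq_true, ite_true, PySem.Dict.mk.injEq, List.cons.injEq, Prod.mk.injEq]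
      all_goals and_intros
      all_goals (push_cast; try ring)
    · rw [pvStepC, ih _ _ _ _ ht]
      simp only [List.count_cons, String.reduceBEq, beq_self_eq_true, ite_true, PySem.Dict.mk.injEq, List.cons.injEq, Prod.mk.injEq]
      all_goals and_intros
      all_goals (push_cast; try ring)
    · rw [pvStepD, ih _ _ _ _ ht]
      simp only [List.count_cons, String.reduceBEq, beq_self_eq_true, ite_true, PySem.Dict.mk.injEq, List.cons.injEq, Prod.mk.injEq]
      all_goals and_intros
      all_goals (push_cast; try ring)

-- Python's max with no key is the keyed fold with the identity key
lemma pvMaxCons {α κ : Type} [LT κ] [DecidableLT κ] (x : α) (t : List α) (key : α → κ) :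
    PySem.List.max? (x :: t) key = some (t.foldl (fun m y => if key m < key y then y else m) x) := by
  induction t generalizing x with
  | nil => rfl
  | cons y t ih =>
    show List.foldl _ (if key x < key y then some y else some x) t
        = some (List.foldl (fun m y => if key m < key y then y else m) (if key x < key y then y else x) t)
    by_cases h : key x < key y
    · rw [if_pos h, if_pos h]; exact ih y
    · rw [if_neg h, if_neg h]; exact ih x

-- on a four-entry score dict, A's max-then-first-filter selection equals B's comparison chain
set_option maxHeartbeats 1000000 in
lemma pvSel (x1 x2 x3 x4 y1 y2 y3 y4 : Int)
    (e1 : y1 = x1) (e2 : y2 = x2) (e3 : y3 = x3) (e4 : y4 = x4) :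
    (let d := PySem.Dict.mk [("Preserver", x1), ("Follower", x2), ("Accumulator", x3), ("Individualist", x4)];
     let highest := (PySem.List.max? d.values (fun v => v)).getD 0;
     (PySem.List.pyGet? ((d.items.filter (fun pr => pr.2 == highest)).map (fun pr => pr.1)) 0).getD "")
    = (if y1 ≥ y2 ∧ y1 ≥ y3 ∧ y1 ≥ y4 then "Preserver"
       else if y2 ≥ y3 ∧ y2 ≥ y4 then "Follower"
       else if y3 ≥ y4 then "Accumulator"
       else "Individualist") := by
  subst e1 e2 e3 e4
  simp only [PySem.Dict.values, List.map_cons, List.map_nil,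
    pvMaxCons, List.foldl_cons, List.foldl_nil, Option.getD_some]
  by_cases c1 : y1 < y2 <;>
    simp only [c1, ite_true, ite_false] <;>
    [by_cases c2 : y2 < y3; by_cases c2 : y1 < y3] <;>
    simp only [c2, ite_true, ite_false] <;>
    [by_cases c3 : y3 < y4; by_cases c3 : y2 < y4; by_cases c3 : y3 < y4; by_cases c3 : y1 < y4] <;>
    simp only [c3, ite_true, ite_false] <;>
    simp only [List.filter_cons, List.filter_nil, beq_iff_eq] <;>
    split_ifs <;>
    first | omega | simp [PySem.List.pyGet?, PySem.List.pyIdx?]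

-- B's tally loop: each valid answer bumps its own slot of the four-key counts dict
lemma pvTally (rs : List String) (a b c d : Int)
    (h : ∀ r ∈ rs, r = "A" ∨ r = "B" ∨ r = "C" ∨ r = "D") :
    rs.foldl (fun d r => d.modify r 0 (· + 1))
      (PySem.Dict.mk [("A", a), ("B", b), ("C", c), ("D", d)])
    = PySem.Dict.mk
        [("A", a + (rs.count "A" : Int)), ("B", b + (rs.count "B" : Int)),
         ("C", c + (rs.count "C" : Int)), ("D", d + (rs.count "D" : Int))] := by
  induction rs generalizing a b c d with
  | nil => simp
  | cons r rs ih =>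
    have ht : ∀ x ∈ rs, x = "A" ∨ x = "B" ∨ x = "C" ∨ x = "D" :=
      fun x hx => h x (List.mem_cons_of_mem _ hx)
    rcases h r (List.mem_cons_self ..) with hr | hr | hr | hr <;> subst hr <;>
      simp only [List.foldl_cons]
    · rw [show (PySem.Dict.mk [("A", a), ("B", b), ("C", c), ("D", d)]).modify "A" 0 (· + 1)
            = PySem.Dict.mk [("A", a + 1), ("B", b), ("C", c), ("D", d)] from rfl, ih _ _ _ _ ht]
      simp only [List.count_cons, String.reduceBEq, beq_self_eq_true, ite_true,
        PySem.Dict.mk.injEq, List.cons.injEq, Prod.mk.injEq, Bool.false_eq_true, if_false,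
        Nat.add_zero, true_and, and_true]
      omega
    · rw [show (PySem.Dict.mk [("A", a), ("B", b), ("C", c), ("D", d)]).modify "B" 0 (· + 1)
            = PySem.Dict.mk [("A", a), ("B", b + 1), ("C", c), ("D", d)] from rfl, ih _ _ _ _ ht]
      simp only [List.count_cons, String.reduceBEq, beq_self_eq_true, ite_true,
        PySem.Dict.mk.injEq, List.cons.injEq, Prod.mk.injEq, Bool.false_eq_true, if_false,
        Nat.add_zero, true_and, and_true]
      omega
    · rw [show (PySem.Dict.mk [("A", a), ("B", b), ("C", c), ("D", d)]).modify "C" 0 (· + 1)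
            = PySem.Dict.mk [("A", a), ("B", b), ("C", c + 1), ("D", d)] from rfl, ih _ _ _ _ ht]
      simp only [List.count_cons, String.reduceBEq, beq_self_eq_true, ite_true,
        PySem.Dict.mk.injEq, List.cons.injEq, Prod.mk.injEq, Bool.false_eq_true, if_false,
        Nat.add_zero, true_and, and_true]
      omega
    · rw [show (PySem.Dict.mk [("A", a), ("B", b), ("C", c), ("D", d)]).modify "D" 0 (· + 1)
            = PySem.Dict.mk [("A", a), ("B", b), ("C", c), ("D", d + 1)] from rfl, ih _ _ _ _ ht]
      simp only [List.count_cons, String.reduceBEq, beq_self_eq_true, ite_true,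
        PySem.Dict.mk.injEq, List.cons.injEq, Prod.mk.injEq, Bool.false_eq_true, if_false,
        Nat.add_zero, true_and, and_true]
      omega

theorem determine_investor_personality_spec : Claim_equal_determine_investor_personality := by
  intro responses _ hpre
  unfold Spec_determine_investor_personality
  simp only [determine_investor_personality, determine_investor_personality_alt]
  rw [pvFoldA responses 0 0 0 0 hpre, pvTally responses 0 0 0 0 hpre]
  simp only [show ∀ a b c d : Int, (PySem.Dict.mk [("A", a), ("B", b), ("C", c), ("D", d)]).getD "A" 0 = a from fun _ _ _ _ => rfl,
    show ∀ a b c d : Int, (PySem.Dict.mk [("A", a), ("B", b), ("C", c), ("D", d)]).getD "B" 0 = b from fun _ _ _ _ => rfl,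
    show ∀ a b c d : Int, (PySem.Dict.mk [("A", a), ("B", b), ("C", c), ("D", d)]).getD "C" 0 = c from fun _ _ _ _ => rfl,
    show ∀ a b c d : Int, (PySem.Dict.mk [("A", a), ("B", b), ("C", c), ("D", d)]).getD "D" 0 = d from fun _ _ _ _ => rfl]
  exact pvSel _ _ _ _ _ _ _ _ (by ring) (by ring) (by ring) (by ring)
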